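-- pv_equiv track=rewrite | github.com/relinee/TinkoffAlgoCourseTasks | Contest 12 (Approximation algorithms)/task_c.py | f
-- ===== SOURCE A (Python) =====
-- def f(t):
--     n = len(t)
--     m = len(t[0])
--     mist = 0
--     for i in range(n):
--         for j in range(m):
--             for k in range(i + 1, n):
--                 for l in range(j + 1, m):
--                     if t[i][j] == t[i][l] == t[k][j] == t[k][l]:
--                         mist += 1
--     return mist
-- ===== SOURCE B (Python) =====
-- def f(t):
--     n = len(t)
--     m = len(t[0])
--     total = 0
--     for i in range(n):
--         for k in range(i + 1, n):
--             cnt = {}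
--             for j in range(m):
--                 v = t[i][j]
--                 if v == t[k][j]:
--                     cnt[v] = cnt.get(v, 0) + 1
--             for c in cnt.values():
--                 total += c * (c - 1) // 2
--     return total
-- ===== Notes on version B (the rewrite author's own statement) =====
-- stated objective: faster
-- what changed: Instead of testing all O(n^2 m^2) quadruples (i,j,k,l), B iterates over row pairs only and, per pair, counts matching columns grouped by value in a dict, adding c*(c-1)//2 per value, removing the inner column-pair loop.
-- outside the precondition, e.g. on f([[1], []]): A returns 0, B raises IndexError
import Mathlib
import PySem

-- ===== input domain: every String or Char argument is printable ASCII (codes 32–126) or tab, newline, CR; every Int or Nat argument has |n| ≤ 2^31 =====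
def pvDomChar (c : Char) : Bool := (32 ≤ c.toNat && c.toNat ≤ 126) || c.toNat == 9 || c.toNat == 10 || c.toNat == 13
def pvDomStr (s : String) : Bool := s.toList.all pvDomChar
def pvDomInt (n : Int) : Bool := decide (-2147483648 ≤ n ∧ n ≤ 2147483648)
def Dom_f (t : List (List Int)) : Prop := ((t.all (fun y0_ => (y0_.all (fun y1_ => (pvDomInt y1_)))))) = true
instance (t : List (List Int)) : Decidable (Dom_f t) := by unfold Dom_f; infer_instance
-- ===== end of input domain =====

-- ===== PORT A =====
-- B re-implements A (count equal-corner rectangles): per row pair it counts matching columns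
-- grouped by value in a dict and adds c*(c-1)//2 per value, instead of testing every column pair.
-- Shared indexing helper: t[i][j] (Nat indices; the getD default is never read under Pre_).
def cell (t : List (List Int)) (i j : Nat) : Int := (t.getD i []).getD j 0

def f (t : List (List Int)) : Int :=
  let n := t.length
  let m := (t.headD []).length
  (List.range n).foldl (fun mist i =>
    (List.range m).foldl (fun mist j =>
      (List.range' (i+1) (n-(i+1))).foldl (fun mist k =>
        (List.range' (j+1) (m-(j+1))).foldl (fun mist l =>
          if cell t i j = cell t i l ∧ cell t i l = cell t k j ∧ cell t k j = cell t k l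
          then mist + 1 else mist) mist) mist) mist) 0

-- ===== PORT B =====
-- c * (c - 1) // 2
def c2 (c : Int) : Int := PySem.Int.floordiv (c * (c - 1)) 2

def f_alt (t : List (List Int)) : Int :=
  let n := t.length
  let m := (t.headD []).length
  (List.range n).foldl (fun total i =>
    (List.range' (i+1) (n-(i+1))).foldl (fun total k =>
      let cnt : PySem.Dict Int Int :=
        (List.range m).foldl (fun d j =>
          if cell t i j = cell t k j then d.insert (cell t i j) (d.getD (cell t i j) 0 + 1)
          else d) PySem.Dict.empty
      cnt.values.foldl (fun total c => total + c2 c) total) total) 0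

-- ===== PRECONDITION & SPEC =====
-- Pre_ = the natural rectangular domain: t nonempty, every row at least len(t[0]) columns long.
-- Outside it A raises IndexError (t[0] on [], t[i][l] on short rows), except on degenerate ragged
-- inputs (fewer than 2 rows or fewer than 2 columns) where A's empty inner loops skip the access
-- and it returns 0 while B's per-column scan raises; those are excluded too.
def Pre_f (t : List (List Int)) : Prop :=
  t ≠ [] ∧ ∀ r ∈ t, (t.headD []).length ≤ r.length
instance (t : List (List Int)) : Decidable (Pre_f t) := by unfold Pre_f; infer_instance
def pvWitness_f : List (List Int) := [[1, 2], [1, 2]]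

def Spec_f (t : List (List Int)) (out : Int) : Prop := out = f_alt t
instance (t : List (List Int)) (out : Int) : Decidable (Spec_f t out) := by unfold Spec_f; infer_instance

-- ===== CLAIM (what is proved, stated in full; the proofs are below) =====
def Claim_equal_f : Prop := ∀ (t : List (List Int)), Dom_f t → Pre_f t → Spec_f t (f t)

-- ===== LEMMAS AND PROOFS =====

-- Sum of C(count,2) over the distinct values of s: what B adds per row pair.
def sumC2 (s : List Int) : Int :=
  ((PySem.Set.ofList s).map (fun v => c2 (s.count v : Int))).sum

theorem c2_succ (c : Int) : c2 (c + 1) = c2 c + c := by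
  unfold c2
  rw [PySem.Int.floordiv_eq_ediv_of_pos (by norm_num : (0:Int) < 2),
      PySem.Int.floordiv_eq_ediv_of_pos (by norm_num : (0:Int) < 2),
      show (c + 1) * (c + 1 - 1) = c * (c - 1) + c * 2 by ring,
      Int.add_mul_ediv_right _ _ (by norm_num : (2:Int) ≠ 0)]

theorem sum_map_ite_mem (l : List Int) (x d : Int) (hnd : l.Nodup) (hx : x ∈ l) :
    (l.map (fun v => if v = x then d else 0)).sum = d := by
  induction l with
  | nil => simp at hx
  | cons a tl ih =>
    simp only [List.map_cons, List.sum_cons]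
    have hnd' := List.nodup_cons.mp hnd
    by_cases ha : a = x
    · subst ha
      have hz : (List.map (fun v => if v = a then d else 0) tl).sum = 0 :=
        List.sum_eq_zero (by
          intro y hy
          rcases List.mem_map.mp hy with ⟨v, hv, rfl⟩
          have hne : v ≠ a := fun e => hnd'.1 (e ▸ hv)
          simp [hne])
      simp [hz]
    · have hx' : x ∈ tl := by
        rcases List.mem_cons.mp hx with h | h
        · exact absurd h.symm ha
        · exact h
      simp [ha, ih hnd'.2 hx']

theorem sumC2_append (s : List Int) (x : Int) :
    sumC2 (s ++ [x]) = sumC2 s + (s.count x : Int) := by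
  unfold sumC2
  rw [PySem.Set.ofList_append_singleton]
  by_cases hx : x ∈ s
  · rw [PySem.Set.add_of_mem ((PySem.Set.mem_ofList _ _).mpr hx)]
    have hfun : ∀ v ∈ PySem.Set.ofList s,
        c2 (((s ++ [x]).count v : Nat) : Int)
          = c2 ((s.count v : Nat) : Int) + (if v = x then (s.count x : Int) else 0) := by
      intro v _
      by_cases hv : v = x
      · subst hv
        have : (s ++ [v]).count v = s.count v + 1 := by simp
        rw [this, if_pos rfl]
        push_cast
        exact c2_succ _
      · have : (s ++ [x]).count v = s.count v := by simp [Ne.symm hv]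
        rw [this, if_neg hv, add_zero]
    rw [List.map_congr_left hfun, List.sum_map_add,
        sum_map_ite_mem _ _ _ (PySem.Set.nodup_ofList _) ((PySem.Set.mem_ofList _ _).mpr hx)]
  · rw [PySem.Set.add_of_not_mem (fun h => hx ((PySem.Set.mem_ofList _ _).mp h))]
    have hcx : s.count x = 0 := List.count_eq_zero_of_not_mem hx
    have hfun : ∀ v ∈ PySem.Set.ofList s,
        c2 (((s ++ [x]).count v : Nat) : Int) = c2 ((s.count v : Nat) : Int) := by
      intro v hv
      have hvx : v ≠ x := fun e => hx (e ▸ (PySem.Set.mem_ofList _ _).mp hv)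
      have : (s ++ [x]).count v = s.count v := by simp [Ne.symm hvx]
      rw [this]
    rw [List.map_append, List.sum_append, List.map_congr_left hfun]
    have hlast : (s ++ [x]).count x = 1 := by simp [hcx]
    simp [hcx]
    decide

theorem sum_map_sum_comm (l1 : List Nat) (l2 : List Nat) (g : Nat → Nat → Int) :
    (l1.map (fun x => (l2.map (fun y => g x y)).sum)).sum
  = (l2.map (fun y => (l1.map (fun x => g x y)).sum)).sum := by
  induction l1 with
  | nil => simp
  | cons a tl ih => simp [List.sum_map_add, ih]

theorem key_lemma (val : Nat → Int) (p : Nat → Prop) [DecidablePred p] (m : Nat) :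
    ((List.range m).map (fun j =>
      ((List.range' (j+1) (m-(j+1))).map (fun l =>
        if p j ∧ p l ∧ val j = val l then (1:Int) else 0)).sum)).sum
  = sumC2 (((List.range m).filter (fun j => decide (p j))).map val) := by
  induction m with
  | zero => simp [sumC2]
  | succ m ih =>
    rw [List.range_succ, List.map_append, List.sum_append, List.filter_append, List.map_append]
    have hlast : ((List.range' (m+1) (m+1-(m+1))).map (fun l =>
        if p m ∧ p l ∧ val m = val l then (1:Int) else 0)).sum = 0 := by
      simp
    have hsplit : ∀ j ∈ List.range m,
        ((List.range' (j+1) (m+1-(j+1))).map (fun l =>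
          if p j ∧ p l ∧ val j = val l then (1:Int) else 0)).sum
      = ((List.range' (j+1) (m-(j+1))).map (fun l =>
          if p j ∧ p l ∧ val j = val l then (1:Int) else 0)).sum
        + (if p j ∧ p m ∧ val j = val m then (1:Int) else 0) := by
      intro j hj
      have hjm : j < m := List.mem_range.mp hj
      have h1 : m + 1 - (j+1) = (m - (j+1)) + 1 := by omega
      have h2 : j + 1 + 1 * (m - (j+1)) = m := by omega
      rw [h1, List.range'_concat, List.map_append, List.sum_append, h2]
      simp
    have h3 : (List.map (fun j =>
        ((List.range' (j+1) (m+1-(j+1))).map (fun l =>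
          if p j ∧ p l ∧ val j = val l then (1:Int) else 0)).sum) [m]).sum = 0 := by
      simp
    rw [List.map_congr_left hsplit, List.sum_map_add, h3, add_zero, ih]
    by_cases hpm : p m
    · have hfilt : List.filter (fun j => decide (p j)) [m] = [m] := by simp [hpm]
      rw [hfilt, List.map_cons, List.map_nil, sumC2_append]
      congr 1
      rw [List.count_eq_countP, List.countP_map, List.countP_filter,
          show (fun j => if p j ∧ p m ∧ val j = val m then (1:Int) else 0)
            = (fun j => if ((fun j => ((val j == val m : Bool) && decide (p j))) j) = true then (1:Int) else 0) from
            funext fun j => by by_cases h1 : p j <;> by_cases h2 : val j = val m <;> simp [h1, h2, hpm]]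
      exact PySem.List.sum_map_ite_one_zero _ _
    · have hfilt : List.filter (fun j => decide (p j)) [m] = [] := by simp [hpm]
      have hz : ((List.range m).map (fun j =>
          if p j ∧ p m ∧ val j = val m then (1:Int) else 0)).sum = 0 := by
        apply List.sum_eq_zero
        intro y hy
        rcases List.mem_map.mp hy with ⟨j, _, rfl⟩
        simp [hpm]
      rw [hfilt, hz]
      simp

theorem bpair (t : List (List Int)) (i k m : Nat) :
    (((List.range m).foldl (fun d j =>
        if cell t i j = cell t k j then d.insert (cell t i j) (d.getD (cell t i j) 0 + 1) else d)
       PySem.Dict.empty).values.map c2).sum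
  = sumC2 (((List.range m).filter (fun j => decide (cell t i j = cell t k j))).map (cell t i)) := by
  rw [PySem.List.foldl_ite_eq_foldl_filter,
      ← List.foldl_map (f := cell t i) (g := fun (d : PySem.Dict Int Int) v => d.insert v (d.getD v 0 + 1)),
      PySem.Dict.foldl_insert_getD_add_one_eq_counter]
  simp only [PySem.Dict.values, PySem.Dict.items_counter, List.map_map]
  unfold sumC2
  rfl

theorem apair (t : List (List Int)) (i k m : Nat) :
    ((List.range m).map (fun j =>
      (↑(List.countP (fun l => decide (cell t i j = cell t i l ∧
          cell t i l = cell t k j ∧ cell t k j = cell t k l))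
        (List.range' (j + 1) (m - (j + 1)))) : Int))).sum
  = sumC2 (((List.range m).filter (fun j => decide (cell t i j = cell t k j))).map (cell t i)) := by
  rw [← key_lemma (cell t i) (fun j => cell t i j = cell t k j) m]
  apply congrArg
  apply List.map_congr_left
  intro j _
  rw [show (fun l => if cell t i j = cell t k j ∧ cell t i l = cell t k l ∧ cell t i j = cell t i l
          then (1:Int) else 0)
        = (fun l => if ((fun l => decide (cell t i j = cell t k j ∧ cell t i l = cell t k l ∧
            cell t i j = cell t i l)) l) = true then (1:Int) else 0) from funext fun l => by by_cases h : cell t i j = cell t k j ∧ cell t i l = cell t k l ∧ cell t i j = cell t i l <;> simp [h],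
      PySem.List.sum_map_ite_one_zero]
  congr 1
  apply List.countP_congr
  intro l _
  simp only [decide_eq_true_eq]
  constructor
  · rintro ⟨h1, h2, h3⟩
    exact ⟨h1.trans h2, (h2.trans h3), h1⟩
  · rintro ⟨q1, q2, q3⟩
    exact ⟨q3, q3.symm.trans q1, (q1.symm.trans q3).trans q2⟩

theorem ports_eq (t : List (List Int)) : f_alt t = f t := by
  unfold f f_alt
  simp only [PySem.List.foldl_ite_add_one, PySem.List.foldl_add, zero_add]
  apply congrArg
  apply List.map_congr_left
  intro i _
  conv_rhs => rw [sum_map_sum_comm (List.range (t.headD []).length)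
    (List.range' (i+1) (t.length-(i+1)))
    (fun j k => (↑(List.countP (fun l => decide (cell t i j = cell t i l ∧
        cell t i l = cell t k j ∧ cell t k j = cell t k l))
      (List.range' (j+1) ((t.headD []).length-(j+1)))) : Int))]
  apply congrArg
  apply List.map_congr_left
  intro k _
  rw [bpair, ← apair]

-- ===== VERDICT (by name: the statement is the Claim_ definition above) =====
theorem f_spec : Claim_equal_f := by
  intro t _ _
  unfold Spec_f
  exact (ports_eq t).symm
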